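-- pv_equiv track=rewrite | github.com/WinterDai/AAI_CL | Work_repos/20260129/CHECKLIST/Check_modules/6.0_POST_SYNTHESIS_LEC_CHECK/scripts/checker/IMP-6-0-0-03.py | _match_black_boxes_with_libs
-- ===== SOURCE A (Python) =====
-- from typing import List, Dict, Any, Tuple
--
-- def _match_black_boxes_with_libs(black_boxes: List[str], lib_files: List[str]) -> Tuple[Dict[str, List[str]], List[str]]:
--     """Match each black box with .lib files containing its name.
--
--     Returns:
--         (matches_dict, missing_list)
--         matches_dict: {black_box: [lib_file1, lib_file2, ...]}
--         missing_list: [black_box1, black_box2, ...] with no .lib match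
--     """
--     matches = {}
--     missing = []
--
--     for bbox in black_boxes:
--         matched_libs = []
--         for lib_file in lib_files:
--             # Case-sensitive containment check
--             if bbox in lib_file:
--                 matched_libs.append(lib_file)
--
--         if matched_libs:
--             matches[bbox] = matched_libs
--         else:
--             missing.append(bbox)
--
--     return matches, missing
-- ===== SOURCE B (Python) =====
-- from typing import List, Dict, Tuple
--
-- def _match_black_boxes_with_libs(black_boxes: List[str], lib_files: List[str]) -> Tuple[Dict[str, List[str]], List[str]]:
--     """Multi-pattern search: instead of scanning every lib file once per box,
--     put the boxes in a hash set, and for each lib file enumerate its windows of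
--     each pattern length and look them up in the set (Rabin-Karp style)."""
--     lens = {len(b) for b in black_boxes}
--     boxset = set(black_boxes)
--     found = {}  # box -> list of lib files containing it, in lib_files order
--     for lib in lib_files:
--         here = set()
--         for L in lens:
--             for i in range(len(lib) - L + 1):
--                 w = lib[i:i + L]
--                 if w in boxset:
--                     here.add(w)
--         for b in here:
--             found.setdefault(b, []).append(lib)
--     matches = {b: found[b] for b in black_boxes if b in found}
--     missing = [b for b in black_boxes if b not in found]
--     return matches, missing
-- ===== Notes on version B (the rewrite author's own statement) =====
-- stated objective: faster
-- what changed: B replaces A's per-box scan of every lib file with multi-pattern set matching: the boxes go into a hash set once, each lib file is scanned a single time enumerating its windows of each distinct pattern length and looking them up in the set (Rabin-Karp style), and matches/missing are read off the accumulated table.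
import Mathlib
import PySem

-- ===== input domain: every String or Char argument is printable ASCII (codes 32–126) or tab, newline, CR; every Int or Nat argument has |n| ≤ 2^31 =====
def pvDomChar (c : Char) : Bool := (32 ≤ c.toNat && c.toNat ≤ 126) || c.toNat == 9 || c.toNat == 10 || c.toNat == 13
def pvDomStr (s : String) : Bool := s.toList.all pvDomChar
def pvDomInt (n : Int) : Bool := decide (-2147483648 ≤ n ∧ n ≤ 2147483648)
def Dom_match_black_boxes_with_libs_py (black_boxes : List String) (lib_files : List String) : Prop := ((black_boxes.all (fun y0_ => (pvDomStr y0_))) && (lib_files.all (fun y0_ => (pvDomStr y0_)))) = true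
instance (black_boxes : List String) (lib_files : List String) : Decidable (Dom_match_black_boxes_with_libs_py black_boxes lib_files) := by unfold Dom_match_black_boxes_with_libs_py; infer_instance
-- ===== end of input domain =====

-- B replaces A's per-box scan of every lib file by multi-pattern set matching (boxes in a hash
-- set, one window-enumeration scan per lib file, Rabin-Karp style); objective: faster (measured).

-- ===== PORT A =====
def match_black_boxes_with_libs_py (black_boxes : List String) (lib_files : List String) : (List (String × List String)) × List String :=
  let res := black_boxes.foldl
    (fun (st : PySem.Dict String (List String) × List String) bbox =>
      let matched := lib_files.foldl
        (fun acc lib => if PySem.Str.isIn bbox lib then acc ++ [lib] else acc) ([] : List String)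
      if matched ≠ [] then (st.1.insert bbox matched, st.2) else (st.1, st.2 ++ [bbox]))
    (PySem.Dict.empty, ([] : List String))
  (res.1.items, res.2)

-- ===== PORT B =====
def match_black_boxes_with_libs_py_alt (black_boxes : List String) (lib_files : List String) : (List (String × List String)) × List String :=
  let lens : PySem.Set Int := PySem.Set.ofList (black_boxes.map PySem.Str.len)
  let boxset : PySem.Set String := PySem.Set.ofList black_boxes
  let found : PySem.Dict String (List String) := lib_files.foldl
    (fun found lib =>
      let here : PySem.Set String := lens.foldl
        (fun here L =>
          (PySem.List.pyRange 0 (PySem.Str.len lib - L + 1) 1).foldl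
            (fun here i =>
              let w := PySem.Str.slice lib (some i) (some (i + L))
              if boxset.contains w then here.add w else here)
            here)
        PySem.Set.empty
      -- 'for b in here: found.setdefault(b, []).append(lib)' — order-independent (each key updated once)
      here.foldl (fun d b => d.modify b [] (fun ls => ls ++ [lib])) found)
    PySem.Dict.empty
  -- found[b] is only read under 'b in found', so getD raises no KeyError
  let matchesd := black_boxes.foldl
    (fun d b => if found.contains b then d.insert b (found.getD b []) else d)
    PySem.Dict.empty
  let missing := black_boxes.filter (fun b => !found.contains b)
  (matchesd.items, missing)

-- ===== PRECONDITION & SPEC =====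
def Spec_match_black_boxes_with_libs_py (black_boxes : List String) (lib_files : List String) (out : (List (String × List String)) × List String) : Prop := out = match_black_boxes_with_libs_py_alt black_boxes lib_files
instance (black_boxes : List String) (lib_files : List String) (out : (List (String × List String)) × List String) : Decidable (Spec_match_black_boxes_with_libs_py black_boxes lib_files out) := by unfold Spec_match_black_boxes_with_libs_py; infer_instance

-- ===== CLAIM (what is proved, stated in full; the proofs are below) =====
def Claim_equal_match_black_boxes_with_libs_py : Prop := ∀ (black_boxes : List String) (lib_files : List String), Dom_match_black_boxes_with_libs_py black_boxes lib_files → Spec_match_black_boxes_with_libs_py black_boxes lib_files (match_black_boxes_with_libs_py black_boxes lib_files)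

-- ===== LEMMAS AND PROOFS =====

-- the per-box hit list both programs compute
def pvF (lib_files : List String) (b : String) : List String :=
  lib_files.filter (fun l => PySem.Str.isIn b l)

-- the canonical matches dict
def pvMk (lib_files : List String) (pre : List String) : PySem.Dict String (List String) :=
  PySem.Dict.mk (((PySem.List.dedup pre).filter (fun b => pvF lib_files b ≠ [])).map
    (fun b => (b, pvF lib_files b)))

theorem pvMk_keys (L pre : List String) :
    (pvMk L pre).keys = (PySem.List.dedup pre).filter (fun b => pvF L b ≠ []) := by
  simp [pvMk, PySem.Dict.keys, Function.comp_def]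

theorem pvMk_keys_nodup (L pre : List String) : (pvMk L pre).keys.Nodup := by
  rw [pvMk_keys]; exact (PySem.List.nodup_dedup pre).filter _

theorem insert_mem_self {d : PySem.Dict String (List String)} {k : String} {v : List String}
    (hnd : d.keys.Nodup) (hmem : (k, v) ∈ d.items) : d.insert k v = d := by
  apply PySem.Dict.ext
  have hc : d.contains k = true := by
    rw [PySem.Dict.contains_iff_mem_keys]
    exact PySem.Dict.mem_keys_of_mem_items d hmem
  rw [PySem.Dict.items_insert_of_contains d v hc]
  have hget : d.get? k = some v := PySem.Dict.get?_of_mem_items d hmem hnd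
  have : ∀ p ∈ d.items, (if p.1 == k then (k, v) else p) = p := by
    intro p hp
    by_cases h : p.1 = k
    · subst h
      have : d.get? p.1 = some p.2 := PySem.Dict.get?_of_mem_items d hp hnd
      rw [hget] at this
      simp at this ⊢
      simp [this]
    · simp [h]
  rw [List.map_congr_left this, List.map_id']

theorem dedup_append_singleton (pre : List String) (x : String) :
    PySem.List.dedup (pre ++ [x]) =
      if x ∈ pre then PySem.List.dedup pre else PySem.List.dedup pre ++ [x] := by
  simp only [PySem.List.dedup_eq_ofList, PySem.Set.ofList_eq_foldl, List.foldl_append,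
    List.foldl_cons, List.foldl_nil]
  rw [← PySem.Set.ofList_eq_foldl]
  simp only [PySem.Set.add]
  by_cases h : x ∈ pre
  · simp [PySem.Set.contains, PySem.Set.mem_ofList, h]
  · simp [PySem.Set.contains, PySem.Set.mem_ofList, h]

-- characterisation of A's fold
theorem A_char (L : List String) : ∀ (bs pre : List String),
    bs.foldl
      (fun (st : PySem.Dict String (List String) × List String) bbox =>
        if pvF L bbox ≠ [] then (st.1.insert bbox (pvF L bbox), st.2) else (st.1, st.2 ++ [bbox]))
      (pvMk L pre, pre.filter (fun b => pvF L b = []))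
    = (pvMk L (pre ++ bs), (pre ++ bs).filter (fun b => pvF L b = [])) := by
  intro bs
  induction bs with
  | nil => intro pre; simp
  | cons x rest ih =>
    intro pre
    have key : (if pvF L x ≠ [] then ((pvMk L pre).insert x (pvF L x), pre.filter (fun b => pvF L b = []))
          else (pvMk L pre, pre.filter (fun b => pvF L b = []) ++ [x]))
        = (pvMk L (pre ++ [x]), (pre ++ [x]).filter (fun b => pvF L b = [])) := by
      by_cases hF : pvF L x = []
      · rw [if_neg (by simp [hF])]
        simp only [Prod.mk.injEq]
        constructor
        · unfold pvMk
          rw [dedup_append_singleton]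
          by_cases hx : x ∈ pre
          · simp [hx]
          · simp [hx, List.filter_append, hF]
        · simp [List.filter_append, hF]
      · rw [if_pos hF]
        simp only [Prod.mk.injEq]
        constructor
        · by_cases hx : x ∈ pre
          · have hdit : (x, pvF L x) ∈ (pvMk L pre).items := by
              simp [pvMk]
              exact ⟨hx, hF⟩
            rw [insert_mem_self (pvMk_keys_nodup L pre) hdit]
            unfold pvMk
            rw [dedup_append_singleton]
            simp [hx]
          · apply PySem.Dict.ext
            have hc : (pvMk L pre).contains x = false := by
              rw [Bool.eq_false_iff, ne_eq, PySem.Dict.contains_iff_mem_keys, pvMk_keys]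
              simp
              intro hmem; exact absurd hmem hx
            rw [PySem.Dict.items_insert_of_not_contains _ _ hc]
            unfold pvMk
            rw [dedup_append_singleton]
            simp [hx, List.filter_append, hF]
        · simp [List.filter_append, hF]
    calc (x :: rest).foldl _ (pvMk L pre, pre.filter (fun b => pvF L b = []))
        = rest.foldl _ (pvMk L (pre ++ [x]), (pre ++ [x]).filter (fun b => pvF L b = [])) := by
          rw [List.foldl_cons, key]
      _ = _ := by rw [ih (pre ++ [x])]; simp

-- A equals the canonical form
theorem A_eq (bbs L : List String) :
    match_black_boxes_with_libs_py bbs L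
      = ((pvMk L bbs).items, bbs.filter (fun b => pvF L b = [])) := by
  unfold match_black_boxes_with_libs_py
  simp only [PySem.List.foldl_append_if_eq_filter, List.nil_append]
  have h0 : (PySem.Dict.empty : PySem.Dict String (List String)) = pvMk L []
      ∧ ([] : List String) = [].filter (fun b => pvF L b = []) := by
    constructor <;> rfl
  rw [h0.1]
  have := A_char L bbs []
  simp only [List.nil_append, List.filter_nil] at this
  rw [show (fun (st : PySem.Dict String (List String) × List String) bbox =>
        if L.filter (fun l => PySem.Str.isIn bbox l) ≠ [] then (st.1.insert bbox (L.filter (fun l => PySem.Str.isIn bbox l)), st.2) else (st.1, st.2 ++ [bbox]))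
      = (fun (st : PySem.Dict String (List String) × List String) bbox =>
        if pvF L bbox ≠ [] then (st.1.insert bbox (pvF L bbox), st.2) else (st.1, st.2 ++ [bbox])) from rfl]
  rw [this]

-- ========== B-side lemmas ==========

-- membership in a conditional-add fold over a set
theorem mem_foldl_add_if {α β : Type} [BEq α] [LawfulBEq α] (f : β → α) (p : α → Bool) :
    ∀ (l : List β) (s : PySem.Set α) (y : α),
    (y ∈ l.foldl (fun s x => if p (f x) then PySem.Set.add s (f x) else s) s)
      ↔ y ∈ s ∨ (p y = true ∧ ∃ x ∈ l, y = f x) := by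
  intro l
  induction l with
  | nil => intro s y; simp
  | cons c rest ih =>
    intro s y
    rw [List.foldl_cons, ih]
    by_cases h : p (f c) = true
    · rw [if_pos h, PySem.Set.mem_add]
      constructor
      · rintro ((hs | rfl) | hr)
        · exact Or.inl hs
        · exact Or.inr ⟨h, c, by simp⟩
        · exact Or.inr ⟨hr.1, by
            obtain ⟨x, hx, hxe⟩ := hr.2
            exact ⟨x, by simp [hx], hxe⟩⟩
      · rintro (hs | ⟨hp, x, hx, rfl⟩)
        · exact Or.inl (Or.inl hs)
        · rcases List.mem_cons.mp hx with rfl | hx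
          · exact Or.inl (Or.inr rfl)
          · exact Or.inr ⟨hp, x, hx, rfl⟩
    · rw [if_neg h]
      constructor
      · rintro (hs | ⟨hp, x, hx, rfl⟩)
        · exact Or.inl hs
        · exact Or.inr ⟨hp, x, by simp [hx], rfl⟩
      · rintro (hs | ⟨hp, x, hx, rfl⟩)
        · exact Or.inl hs
        · rcases List.mem_cons.mp hx with rfl | hx
          · exact absurd hp h
          · exact Or.inr ⟨hp, x, hx, rfl⟩

theorem nodup_foldl_add_if {α β : Type} [BEq α] [LawfulBEq α] (f : β → α) (p : α → Bool) :
    ∀ (l : List β) (s : PySem.Set α), s.Nodup →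
    (l.foldl (fun s x => if p (f x) then PySem.Set.add s (f x) else s) s).Nodup := by
  intro l
  induction l with
  | nil => intro s hs; exact hs
  | cons c rest ih =>
    intro s hs
    rw [List.foldl_cons]
    apply ih
    by_cases h : p (f c) = true
    · rw [if_pos h]; exact PySem.Set.nodup_add s (f c) hs
    · rw [if_neg h]; exact hs

-- the 'here' set of one lib file
def pvHere (boxset : PySem.Set String) (lib : String) (lensl : List Int) : PySem.Set String :=
  lensl.foldl
    (fun here L =>
      (PySem.List.pyRange 0 (PySem.Str.len lib - L + 1) 1).foldl
        (fun here i =>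
          if boxset.contains (PySem.Str.slice lib (some i) (some (i + L))) then
            here.add (PySem.Str.slice lib (some i) (some (i + L))) else here)
        here)
    PySem.Set.empty

theorem mem_pvHere_aux (boxset : PySem.Set String) (lib : String) :
    ∀ (lensl : List Int) (s : PySem.Set String) (y : String),
    (y ∈ lensl.foldl
      (fun here L =>
        (PySem.List.pyRange 0 (PySem.Str.len lib - L + 1) 1).foldl
          (fun here i =>
            if boxset.contains (PySem.Str.slice lib (some i) (some (i + L))) then
              here.add (PySem.Str.slice lib (some i) (some (i + L))) else here)
          here)
      s)
    ↔ y ∈ s ∨ (boxset.contains y = true ∧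
        ∃ L ∈ lensl, ∃ i ∈ PySem.List.pyRange 0 (PySem.Str.len lib - L + 1) 1,
          y = PySem.Str.slice lib (some i) (some (i + L))) := by
  intro lensl
  induction lensl with
  | nil => intro s y; simp
  | cons L0 rest ih =>
    intro s y
    rw [List.foldl_cons, ih,
      mem_foldl_add_if (fun i => PySem.Str.slice lib (some i) (some (i + L0))) (boxset.contains)]
    constructor
    · rintro ((hs | ⟨hp, i, hi, rfl⟩) | ⟨hp, L, hL, hw⟩)
      · exact Or.inl hs
      · exact Or.inr ⟨hp, L0, by simp, i, hi, rfl⟩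
      · exact Or.inr ⟨hp, L, by simp [hL], hw⟩
    · rintro (hs | ⟨hp, L, hL, i, hi, hw⟩)
      · exact Or.inl (Or.inl hs)
      · rcases List.mem_cons.mp hL with rfl | hL
        · exact Or.inl (Or.inr ⟨hp, i, hi, hw⟩)
        · exact Or.inr ⟨hp, L, hL, i, hi, hw⟩

theorem nodup_pvHere (boxset : PySem.Set String) (lib : String) (lensl : List Int) :
    (pvHere boxset lib lensl).Nodup := by
  unfold pvHere
  generalize hgen : (PySem.Set.empty : PySem.Set String) = s
  have hs : s.Nodup := by rw [← hgen]; exact List.nodup_nil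
  clear hgen
  induction lensl generalizing s with
  | nil => exact hs
  | cons L rest ih =>
    rw [List.foldl_cons]
    exact ih _ (nodup_foldl_add_if (fun i => PySem.Str.slice lib (some i) (some (i + L)))
      (boxset.contains) _ s hs)

-- a window of lib is an infix of lib
theorem slice_infix (lib : String) (i L : Int) (hi : 0 ≤ i) (hL : 0 ≤ L) :
    (PySem.Str.slice lib (some i) (some (i + L))).toList <:+: lib.toList := by
  rw [PySem.Str.toList_slice, PySem.Chars.slice_eq_listSlice,
    PySem.List.slice_toNat lib.toList hi (show (0:Int) ≤ i + L by omega)]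
  exact ((List.take_prefix _ _).isInfix).trans (List.drop_suffix _ _).isInfix

-- an infix of lib of length L is some window of lib
theorem infix_window (lib b : String) (hinf : b.toList <:+: lib.toList) :
    ∃ i ∈ PySem.List.pyRange 0 (PySem.Str.len lib - PySem.Str.len b + 1) 1,
      b = PySem.Str.slice lib (some i) (some (i + PySem.Str.len b)) := by
  obtain ⟨s, t, hst⟩ := hinf
  refine ⟨(s.length : Int), ?_, ?_⟩
  · rw [PySem.List.mem_pyRange_one]
    have : lib.toList.length = s.length + b.toList.length + t.length := by
      rw [← hst]; simp; omega
    simp [PySem.Str.len] at *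
    omega
  · apply String.ext
    rw [PySem.Str.toList_slice, PySem.Chars.slice_eq_listSlice]
    have hlen : PySem.Str.len b = (b.toList.length : Int) := by
      simp [PySem.Str.len]
    rw [hlen, PySem.List.slice_natCast_add, ← hst]
    rw [show s ++ b.toList ++ t = s ++ (b.toList ++ t) by simp]
    rw [List.drop_left, List.take_left]

-- membership in the 'here' set = box matches this lib file
theorem mem_pvHere (bbs : List String) (lib y : String) :
    y ∈ pvHere (PySem.Set.ofList bbs) lib (PySem.Set.ofList (bbs.map PySem.Str.len))
      ↔ y ∈ PySem.Set.ofList bbs ∧ PySem.Str.isIn y lib = true := by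
  unfold pvHere
  rw [mem_pvHere_aux]
  constructor
  · rintro (hemp | ⟨hc, L, hL, i, hi, rfl⟩)
    · simp [PySem.Set.empty] at hemp
    rw [PySem.Set.contains_iff] at hc
    refine ⟨hc, ?_⟩
    rw [PySem.Str.isIn_iff_infix]
    rw [PySem.List.mem_pyRange_one] at hi
    have hLnn : 0 ≤ L := by
      rw [PySem.Set.mem_ofList] at hL
      obtain ⟨b', _, rfl⟩ := List.mem_map.mp hL
      simp [PySem.Str.len]
    exact slice_infix lib i L hi.1 hLnn
  · rintro ⟨hmem, hin⟩
    rw [PySem.Str.isIn_iff_infix] at hin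
    obtain ⟨i, hi, hw⟩ := infix_window lib y hin
    refine Or.inr ⟨by rw [PySem.Set.contains_iff]; exact hmem, PySem.Str.len y, ?_, i, hi, hw⟩
    rw [PySem.Set.mem_ofList]
    exact List.mem_map.mpr ⟨y, (PySem.Set.mem_ofList bbs y).mp hmem, rfl⟩

-- effect of one lib file's update pass on 'found'
theorem modfold_getD (lib : String) : ∀ (hs : List String), hs.Nodup →
    ∀ (d : PySem.Dict String (List String)) (b : String),
    (hs.foldl (fun d b' => d.modify b' [] (fun ls => ls ++ [lib])) d).getD b []
      = d.getD b [] ++ (if b ∈ hs then [lib] else []) := by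
  intro hs
  induction hs with
  | nil => intro _ d b; simp
  | cons c rest ih =>
    intro hnd d b
    rw [List.foldl_cons, ih (List.nodup_cons.mp hnd).2]
    rw [PySem.Dict.getD_modify]
    by_cases h : b = c
    · subst h
      rw [if_pos rfl, if_neg (by exact fun hm => (List.nodup_cons.mp hnd).1 hm), if_pos (by simp)]
      simp
    · rw [if_neg h]
      by_cases hr : b ∈ rest
      · rw [if_pos hr, if_pos (by simp [hr])]
      · rw [if_neg hr, if_neg (by simp [h, hr])]

theorem modfold_contains (lib : String) : ∀ (hs : List String)
    (d : PySem.Dict String (List String)) (b : String),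
    (hs.foldl (fun d b' => d.modify b' [] (fun ls => ls ++ [lib])) d).contains b
      = (d.contains b || decide (b ∈ hs)) := by
  intro hs
  induction hs with
  | nil => intro d b; simp
  | cons c rest ih =>
    intro d b
    rw [List.foldl_cons, ih, PySem.Dict.contains_modify]
    by_cases h : b = c
    · simp [h]
    · rw [show (b == c) = false by simp [h]]
      simp [h]

-- the accumulated 'found' table after all lib files
theorem found_getD (bbs : List String) (b : String) (hb : b ∈ bbs) :
    ∀ (L : List String) (d : PySem.Dict String (List String)),
    (L.foldl (fun found lib =>
        (pvHere (PySem.Set.ofList bbs) lib (PySem.Set.ofList (bbs.map PySem.Str.len))).foldl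
          (fun d b' => d.modify b' [] (fun ls => ls ++ [lib])) found) d).getD b []
      = d.getD b [] ++ pvF L b := by
  intro L
  induction L with
  | nil => intro d; simp [pvF]
  | cons lib rest ih =>
    intro d
    rw [List.foldl_cons, ih, modfold_getD lib _ (nodup_pvHere _ _ _)]
    unfold pvF
    rw [List.filter_cons]
    by_cases hin : PySem.Str.isIn b lib = true
    · rw [if_pos (by rw [mem_pvHere]; exact ⟨(PySem.Set.mem_ofList bbs b).mpr hb, hin⟩)]
      have hin' : PySem.Chars.isIn b.toList lib.toList = true := by
        rw [← PySem.Str.isIn_eq]; exact hin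
      simp [hin']
    · rw [if_neg (by rw [mem_pvHere]; exact fun hx => hin hx.2)]
      have hin' : PySem.Chars.isIn b.toList lib.toList = false := by
        rw [← PySem.Str.isIn_eq]; exact Bool.eq_false_iff.mpr hin
      simp [hin']

theorem found_contains (bbs : List String) (b : String) (hb : b ∈ bbs) :
    ∀ (L : List String) (d : PySem.Dict String (List String)),
    (L.foldl (fun found lib =>
        (pvHere (PySem.Set.ofList bbs) lib (PySem.Set.ofList (bbs.map PySem.Str.len))).foldl
          (fun d b' => d.modify b' [] (fun ls => ls ++ [lib])) found) d).contains b
      = (d.contains b || decide (pvF L b ≠ [])) := by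
  intro L
  induction L with
  | nil => intro d; simp [pvF]
  | cons lib rest ih =>
    intro d
    rw [List.foldl_cons, ih, modfold_contains]
    unfold pvF
    rw [List.filter_cons]
    by_cases hin : PySem.Str.isIn b lib = true
    · rw [decide_eq_true_iff.mpr (by rw [mem_pvHere]; exact ⟨(PySem.Set.mem_ofList bbs b).mpr hb, hin⟩)]
      have hin' : PySem.Chars.isIn b.toList lib.toList = true := by
        rw [← PySem.Str.isIn_eq]; exact hin
      simp [hin']
    · rw [decide_eq_false_iff_not.mpr (by rw [mem_pvHere]; exact fun hx => hin hx.2)]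
      have hin' : PySem.Chars.isIn b.toList lib.toList = false := by
        rw [← PySem.Str.isIn_eq]; exact Bool.eq_false_iff.mpr hin
      simp [hin']

-- the matches dict fold (shared canonical form)
theorem M_char (L : List String) : ∀ (bs pre : List String),
    bs.foldl (fun (d : PySem.Dict String (List String)) b =>
        if pvF L b ≠ [] then d.insert b (pvF L b) else d) (pvMk L pre)
    = pvMk L (pre ++ bs) := by
  intro bs
  induction bs with
  | nil => intro pre; simp
  | cons x rest ih =>
    intro pre
    have key : (if pvF L x ≠ [] then (pvMk L pre).insert x (pvF L x) else pvMk L pre)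
        = pvMk L (pre ++ [x]) := by
      by_cases hF : pvF L x = []
      · rw [if_neg (by simp [hF])]
        unfold pvMk
        rw [dedup_append_singleton]
        by_cases hx : x ∈ pre
        · simp [hx]
        · simp [hx, List.filter_append, hF]
      · rw [if_pos hF]
        by_cases hx : x ∈ pre
        · have hdit : (x, pvF L x) ∈ (pvMk L pre).items := by
            simp [pvMk]
            exact ⟨hx, hF⟩
          rw [insert_mem_self (pvMk_keys_nodup L pre) hdit]
          unfold pvMk
          rw [dedup_append_singleton]
          simp [hx]
        · apply PySem.Dict.ext
          have hc : (pvMk L pre).contains x = false := by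
            rw [Bool.eq_false_iff, ne_eq, PySem.Dict.contains_iff_mem_keys, pvMk_keys]
            simp
            intro hmem; exact absurd hmem hx
          rw [PySem.Dict.items_insert_of_not_contains _ _ hc]
          unfold pvMk
          rw [dedup_append_singleton]
          simp [hx, List.filter_append, hF]
    rw [List.foldl_cons, key, ih (pre ++ [x])]
    simp

-- B equals the canonical form
def pvFound (bbs L : List String) : PySem.Dict String (List String) :=
  L.foldl (fun found lib =>
      (pvHere (PySem.Set.ofList bbs) lib (PySem.Set.ofList (bbs.map PySem.Str.len))).foldl
        (fun d b' => d.modify b' [] (fun ls => ls ++ [lib])) found)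
    PySem.Dict.empty

theorem alt_canon (bbs L : List String) :
    match_black_boxes_with_libs_py_alt bbs L
      = ((bbs.foldl (fun d b => if (pvFound bbs L).contains b
              then d.insert b ((pvFound bbs L).getD b []) else d) PySem.Dict.empty).items,
         bbs.filter (fun b => !(pvFound bbs L).contains b)) := rfl

theorem B_eq (bbs L : List String) :
    match_black_boxes_with_libs_py_alt bbs L
      = ((pvMk L bbs).items, bbs.filter (fun b => pvF L b = [])) := by
  rw [alt_canon]
  have hgetD : ∀ b ∈ bbs, (pvFound bbs L).getD b [] = pvF L b := by
    intro b hb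
    unfold pvFound
    rw [found_getD bbs b hb L PySem.Dict.empty]
    simp
  have hcont : ∀ b ∈ bbs, (pvFound bbs L).contains b = decide (pvF L b ≠ []) := by
    intro b hb
    unfold pvFound
    rw [found_contains bbs b hb L PySem.Dict.empty]
    simp
  simp only [Prod.mk.injEq]
  constructor
  · have hstep : ∀ (d : PySem.Dict String (List String)), ∀ b ∈ bbs,
        (if (pvFound bbs L).contains b = true
          then d.insert b ((pvFound bbs L).getD b []) else d)
          = (if pvF L b ≠ [] then d.insert b (pvF L b) else d) := by
      intro d b hb
      rw [hgetD b hb, hcont b hb]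
      by_cases hF : pvF L b = [] <;> simp [hF]
    rw [PySem.List.foldl_congr_mem bbs _ _ PySem.Dict.empty (fun d b hb => hstep d b hb)]
    have := M_char L bbs []
    simp only [List.nil_append] at this
    rw [show (PySem.Dict.empty : PySem.Dict String (List String)) = pvMk L [] from rfl, this]
  · apply List.filter_congr
    intro b hb
    rw [hcont b hb]
    by_cases hF : pvF L b = [] <;> simp [hF]

-- ===== VERDICT (by name: the statement is the Claim_ definition above) =====
theorem match_black_boxes_with_libs_py_spec : Claim_equal_match_black_boxes_with_libs_py := by
  intro bbs L _
  unfold Spec_match_black_boxes_with_libs_py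
  rw [A_eq, B_eq]
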